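-- pv_equiv track=rewrite | github.com/salomeaaleksandra/EvolutionaryAlgorithm | evoalgfunc.py | repair_duplicates
-- ===== SOURCE A (Python) =====
-- def repair_duplicates(genotype, side1, side2):
--     """
--     Repair duplicates in a genotype by replacing the second occurrence of duplicates
--     with missing values.
--
--     Parameters:
--         genotype (list): List of tuples (e.g., [('A1', 'B1'), ...]).
--         side1 (list): List of valid nodes on side 1.
--         side2 (list): List of valid nodes on side 2.
--
--     Returns:
--         list: Repaired genotype with no duplicates.
--     """
--     side1_nodes = [gene[0] for gene in genotype]
--     side2_nodes = [gene[1] for gene in genotype]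
--
--     # Identify duplicates and missing values
--     duplicates_side2 = [node for node in side2_nodes if side2_nodes.count(node) > 1]
--     missing_side2 = [node for node in side2 if node not in side2_nodes]
--
--     # Replace the second occurrence of duplicates on side 2
--     for i, node in enumerate(side2_nodes):
--         if node in duplicates_side2:
--             # Only replace the second occurrence (not the first)
--             if side2_nodes[:i].count(node) > 0:
--                 genotype[i] = (genotype[i][0], missing_side2.pop(0))
--                 duplicates_side2.remove(node)
--
--     return genotype
-- ===== SOURCE B (Python) =====
-- def repair_duplicates(genotype, side1, side2):
--     # One linear pass with a seen-set collects the non-first duplicate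
--     # positions; missing values are then assigned to them by index.
--     seen = set()
--     dup_positions = []
--     for i, gene in enumerate(genotype):
--         if gene[1] in seen:
--             dup_positions.append(i)
--         else:
--             seen.add(gene[1])
--     missing = [n for n in side2 if n not in seen]
--     for k, i in enumerate(dup_positions):
--         genotype[i] = (genotype[i][0], missing[k])
--     return genotype
-- ===== Notes on version B (the rewrite author's own statement) =====
-- stated objective: faster
-- what changed: Replaces A's quadratic count-based duplicate multiset and per-step prefix counts / list.remove with one linear pass over genotype that maintains a seen-set and collects the non-first duplicate positions, then assigns the missing side2 values to those positions by index.
import Mathlib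
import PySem

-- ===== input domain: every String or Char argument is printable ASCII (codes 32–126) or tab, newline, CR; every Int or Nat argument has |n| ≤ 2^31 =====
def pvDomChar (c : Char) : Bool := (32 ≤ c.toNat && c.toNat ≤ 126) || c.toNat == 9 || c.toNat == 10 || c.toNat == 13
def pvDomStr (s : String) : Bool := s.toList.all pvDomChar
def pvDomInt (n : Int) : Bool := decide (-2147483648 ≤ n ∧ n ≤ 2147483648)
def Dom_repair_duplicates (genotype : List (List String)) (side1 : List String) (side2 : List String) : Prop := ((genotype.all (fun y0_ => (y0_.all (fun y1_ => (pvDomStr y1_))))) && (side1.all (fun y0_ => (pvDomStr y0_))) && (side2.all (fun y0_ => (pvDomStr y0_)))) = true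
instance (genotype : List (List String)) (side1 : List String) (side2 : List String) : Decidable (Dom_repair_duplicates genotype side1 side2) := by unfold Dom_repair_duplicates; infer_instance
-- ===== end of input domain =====

-- B replaces A's quadratic counting with one seen-set pass; equivalence is about the return
-- value — both Pythons also mutate `genotype` in place in the same way.

-- gene[1] / gene[0]: in-range under Pre_ (gene length ≥ 2); getD is only a totality guard.
def pvGet1 (g : List String) : String := g.getD 1 ""
def pvGet0 (g : List String) : String := g.getD 0 ""

-- ===== PORT A =====
-- A's for-loop over enumerate(side2_nodes); state: genotype, duplicates_side2, missing_side2.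
-- missing_side2.pop(0) on empty raises in Python (excluded by Pre_): headD/tail is a totality guard.
def loopA (s2 : List String) : Nat → List String → List (List String) → List String → List String → List (List String)
  | _, [], geno, _, _ => geno
  | i, node :: rest, geno, dups, missing =>
    if node ∈ dups then
      if 0 < (s2.take i).count node then
        loopA s2 (i+1) rest
          (geno.set i [pvGet0 (geno.getD i []), missing.headD ""])
          (dups.erase node) missing.tail
      else loopA s2 (i+1) rest geno dups missing
    else loopA s2 (i+1) rest geno dups missing

def repair_duplicates (genotype : List (List String)) (side1 : List String) (side2 : List String) : List (List String) :=
  let _side1_nodes : List String := genotype.map pvGet0   -- computed by A, unused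
  let side2_nodes : List String := genotype.map pvGet1
  let duplicates_side2 : List String := side2_nodes.filter (fun n => decide (1 < side2_nodes.count n))
  let missing_side2 : List String := side2.filter (fun n => decide (n ∉ side2_nodes))
  loopA side2_nodes 0 side2_nodes genotype duplicates_side2 missing_side2

-- ===== PORT B =====
-- B's first pass: seen-set plus the list of non-first duplicate positions.
def collectB : Nat → List (List String) → PySem.Set String → List Nat → (PySem.Set String × List Nat)
  | _, [], seen, dps => (seen, dps)
  | i, gene :: rest, seen, dps =>
    if pvGet1 gene ∈ seen then collectB (i+1) rest seen (dps ++ [i])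
    else collectB (i+1) rest (PySem.Set.add seen (pvGet1 gene)) dps

-- B's second pass: genotype[i] = (genotype[i][0], missing[k]); missing[k] raises in Python when
-- missing is too short (excluded by Pre_): getD "" is a totality guard.
def assignB : List (List String) → List String → Nat → List Nat → List (List String)
  | geno, _, _, [] => geno
  | geno, missing, k, i :: is =>
    assignB (geno.set i [pvGet0 (geno.getD i []), missing.getD k ""]) missing (k+1) is

def repair_duplicates_alt (genotype : List (List String)) (side1 : List String) (side2 : List String) : List (List String) :=
  let r := collectB 0 genotype PySem.Set.empty []
  let missing : List String := side2.filter (fun n => decide (n ∉ r.1))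
  assignB genotype missing 0 r.2

-- ===== PRECONDITION & SPEC =====
-- Pre_ = exactly the inputs where Python A returns: every gene long enough for gene[1]
-- (else IndexError), and at least as many missing side2 values as non-first duplicate
-- positions (else missing_side2.pop(0) raises IndexError).
def Pre_repair_duplicates (genotype : List (List String)) (side1 : List String) (side2 : List String) : Prop :=
  (∀ g ∈ genotype, 2 ≤ g.length) ∧
  (genotype.map pvGet1).length - (PySem.List.dedup (genotype.map pvGet1)).length
    ≤ (side2.filter (fun n => decide (n ∉ genotype.map pvGet1))).length

instance (genotype : List (List String)) (side1 : List String) (side2 : List String) : Decidable (Pre_repair_duplicates genotype side1 side2) := by unfold Pre_repair_duplicates; infer_instance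

def pvWitness_repair_duplicates : List (List String) × List String × List String :=
  ([["A1", "B1"], ["A2", "B1"]], (["A1", "A2"], ["B1", "B2"]))

def Spec_repair_duplicates (genotype : List (List String)) (side1 : List String) (side2 : List String) (out : List (List String)) : Prop := out = repair_duplicates_alt genotype side1 side2
instance (genotype : List (List String)) (side1 : List String) (side2 : List String) (out : List (List String)) : Decidable (Spec_repair_duplicates genotype side1 side2 out) := by unfold Spec_repair_duplicates; infer_instance

-- ===== CLAIM (what is proved, stated in full; the proofs are below) =====
def Claim_equal_repair_duplicates : Prop := ∀ (genotype : List (List String)) (side1 : List String) (side2 : List String), Dom_repair_duplicates genotype side1 side2 → Pre_repair_duplicates genotype side1 side2 → Spec_repair_duplicates genotype side1 side2 (repair_duplicates genotype side1 side2)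

-- ===== LEMMAS AND PROOFS =====

-- Common form of both ports: apply the replacements at the given positions, consuming
-- `missing` front-to-back.
def applyAll : List (List String) → List String → List Nat → List (List String)
  | geno, _, [] => geno
  | geno, missing, i :: is =>
    applyAll (geno.set i [pvGet0 (geno.getD i []), missing.headD ""]) missing.tail is

-- The non-first duplicate positions, scanning with an explicit prefix.
def dupPosPre : List String → List String → Nat → List Nat
  | _, [], _ => []
  | pre, n :: rest, i => (if n ∈ pre then [i] else []) ++ dupPosPre (pre ++ [n]) rest (i+1)

theorem assignB_eq_applyAll (is : List Nat) : ∀ (geno : List (List String)) (missing : List String) (k : Nat),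
    assignB geno missing k is = applyAll geno (missing.drop k) is := by
  induction is with
  | nil => intro geno missing k; rfl
  | cons i is ih =>
      intro geno missing k
      have h1 : missing.getD k "" = (missing.drop k).headD "" := by
        simp [List.getD, List.head?_drop]
      have h2 : missing.drop (k+1) = (missing.drop k).tail := by
        rw [List.tail_drop]
      rw [assignB, applyAll, ih, h1, h2]

theorem collectB_snd (genes : List (List String)) : ∀ (i : Nat) (seen : PySem.Set String) (dps : List Nat) (pre : List String),
    (∀ x, x ∈ seen ↔ x ∈ pre) →
    (collectB i genes seen dps).2 = dps ++ dupPosPre pre (genes.map pvGet1) i := by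
  induction genes with
  | nil => intro i seen dps pre _; simp [collectB, dupPosPre]
  | cons g rest ih =>
      intro i seen dps pre hmem
      by_cases h : pvGet1 g ∈ seen
      · have hp : pvGet1 g ∈ pre := (hmem _).1 h
        rw [collectB, if_pos h, ih (i+1) seen (dps ++ [i]) (pre ++ [pvGet1 g])
            (by intro x; rw [hmem]; simp; intro hx; subst hx; exact hp)]
        rw [List.map_cons, dupPosPre, if_pos hp]
        simp
      · have hp : pvGet1 g ∉ pre := fun hx => h ((hmem _).2 hx)
        rw [collectB, if_neg h, ih (i+1) _ dps (pre ++ [pvGet1 g])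
            (by intro x; rw [PySem.Set.mem_add, hmem]; simp)]
        rw [List.map_cons, dupPosPre, if_neg hp, List.nil_append]

theorem collectB_fst (genes : List (List String)) : ∀ (i : Nat) (seen : PySem.Set String) (dps : List Nat) (x : String),
    x ∈ (collectB i genes seen dps).1 ↔ x ∈ seen ∨ x ∈ genes.map pvGet1 := by
  induction genes with
  | nil => intro i seen dps x; simp [collectB]
  | cons g rest ih =>
      intro i seen dps x
      by_cases h : pvGet1 g ∈ seen
      · rw [collectB, if_pos h, ih]
        simp only [List.map_cons, List.mem_cons]
        constructor
        · rintro (hs | hr)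
          · exact Or.inl hs
          · exact Or.inr (Or.inr hr)
        · rintro (hs | he | hr)
          · exact Or.inl hs
          · subst he; exact Or.inl h
          · exact Or.inr hr
      · rw [collectB, if_neg h, ih]
        rw [PySem.Set.mem_add]
        simp only [List.map_cons, List.mem_cons]
        tauto

-- The invariant A's loop maintains on duplicates_side2.
def InvD (s2 pre dups : List String) : Prop :=
  ∀ x, (1 < s2.count x → dups.count x + pre.count x = s2.count x + min (pre.count x) 1) ∧
       (s2.count x ≤ 1 → x ∉ dups)

theorem loopA_eq_applyAll (rest : List String) : ∀ (pre : List String) (geno : List (List String)) (dups missing : List String),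
    InvD (pre ++ rest) pre dups →
    loopA (pre ++ rest) pre.length rest geno dups missing
      = applyAll geno missing (dupPosPre pre rest pre.length) := by
  induction rest with
  | nil => intro pre geno dups missing _; simp [loopA, dupPosPre, applyAll]
  | cons n rest ih =>
      intro pre geno dups missing hinv
      have htake : (pre ++ n :: rest).take pre.length = pre := List.take_left' rfl
      have hcnt : (pre ++ n :: rest).count n = pre.count n + (rest.count n + 1) := by
        simp [List.count_append, List.count_cons]
      have hassoc : pre ++ n :: rest = (pre ++ [n]) ++ rest := by simp
      have hlen : (pre ++ [n]).length = pre.length + 1 := by simp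
      by_cases hp : n ∈ pre
      · -- second (or later) occurrence: replace it
        have hpc : 0 < pre.count n := List.count_pos_iff.2 hp
        have hgt : 1 < (pre ++ n :: rest).count n := by omega
        have hd : 0 < dups.count n := by
          have h1 := (hinv n).1 hgt
          omega
        have hnd : n ∈ dups := List.count_pos_iff.1 hd
        have hinv' : InvD ((pre ++ [n]) ++ rest) (pre ++ [n]) (dups.erase n) := by
          intro x
          rw [← hassoc]
          rcases eq_or_ne x n with he | he
          · subst he
            have h1 := (hinv x).1 hgt
            have hce : (dups.erase x).count x = dups.count x - 1 := by
              rw [List.count_erase_self]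
            have hcp : (pre ++ [x]).count x = pre.count x + 1 := by simp
            constructor
            · intro _; rw [hce, hcp]; omega
            · intro hle; omega
          · have hce : (dups.erase n).count x = dups.count x := by
              rw [List.count_erase]; simp [Ne.symm he]
            have hcp : (pre ++ [n]).count x = pre.count x := by
              simp [List.count_append, List.count_cons, he, Ne.symm he]
            constructor
            · intro hx; rw [hce, hcp]; exact (hinv x).1 hx
            · intro hx hm; exact (hinv x).2 hx (List.mem_of_mem_erase hm)
        rw [loopA, if_pos hnd, htake, if_pos hpc, dupPosPre, if_pos hp,
            List.singleton_append, applyAll]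
        rw [show pre.length + 1 = (pre ++ [n]).length from hlen.symm, hassoc] at *
        exact ih (pre ++ [n]) _ (dups.erase n) missing.tail hinv'
      · -- first occurrence: no replacement, whether or not n is in duplicates_side2
        have hpc : pre.count n = 0 := List.count_eq_zero.2 hp
        have hinv' : InvD ((pre ++ [n]) ++ rest) (pre ++ [n]) dups := by
          intro x
          rw [← hassoc]
          rcases eq_or_ne x n with he | he
          · subst he
            have hcp : (pre ++ [x]).count x = pre.count x + 1 := by simp
            constructor
            · intro hx
              have h1 := (hinv x).1 hx
              rw [hcp]; omega
            · exact (hinv x).2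
          · have hcp : (pre ++ [n]).count x = pre.count x := by
              simp [List.count_append, List.count_cons, he, Ne.symm he]
            constructor
            · intro hx; rw [hcp]; exact (hinv x).1 hx
            · exact (hinv x).2
        have hred : loopA (pre ++ n :: rest) pre.length (n :: rest) geno dups missing
            = loopA (pre ++ n :: rest) (pre.length + 1) rest geno dups missing := by
          rw [loopA]
          by_cases hnd : n ∈ dups
          · rw [if_pos hnd, htake, if_neg (by omega)]
          · rw [if_neg hnd]
        rw [hred, dupPosPre, if_neg hp, List.nil_append]
        rw [show pre.length + 1 = (pre ++ [n]).length from hlen.symm, hassoc] at *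
        exact ih (pre ++ [n]) geno dups missing hinv'

theorem loopA_top (s2 : List String) (geno : List (List String)) (missing : List String) :
    loopA s2 0 s2 geno (s2.filter (fun n => decide (1 < s2.count n))) missing
      = applyAll geno missing (dupPosPre [] s2 0) := by
  have hinv : InvD ([] ++ s2) [] (s2.filter (fun n => decide (1 < s2.count n))) := by
    intro x
    rw [List.nil_append]
    constructor
    · intro hx
      have hcf : (s2.filter (fun n => decide (1 < s2.count n))).count x = s2.count x :=
        List.count_filter (by simpa using hx)
      simp only [List.count_nil, hcf]
      omega
    · intro hx hm
      rw [List.mem_filter] at hm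
      have : 1 < s2.count x := by simpa using hm.2
      omega
  have h := loopA_eq_applyAll s2 [] geno (s2.filter (fun n => decide (1 < s2.count n))) missing hinv
  simpa using h

theorem repair_duplicates_eq (genotype : List (List String)) (side1 side2 : List String) :
    repair_duplicates genotype side1 side2 = repair_duplicates_alt genotype side1 side2 := by
  unfold repair_duplicates repair_duplicates_alt
  rw [loopA_top, assignB_eq_applyAll, List.drop_zero,
      collectB_snd genotype 0 PySem.Set.empty [] [] (by intro x; rfl),
      List.nil_append]
  congr 1
  apply List.filter_congr
  intro n _
  show decide (n ∉ genotype.map pvGet1) = decide (n ∉ (collectB 0 genotype PySem.Set.empty []).1)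
  rw [decide_eq_decide]
  exact not_congr ((collectB_fst genotype 0 PySem.Set.empty [] n).trans
    (by simp [PySem.Set.empty])).symm

-- ===== VERDICT (by name: the statement is the Claim_ definition above) =====
theorem repair_duplicates_spec : Claim_equal_repair_duplicates := by
  intro genotype side1 side2 _ _
  unfold Spec_repair_duplicates
  exact repair_duplicates_eq genotype side1 side2
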